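-- pv_equiv track=rewrite | github.com/qiunimate/goodminton_vision | helper_func.py | simplify_instruction
-- ===== SOURCE A (Python) =====
-- def simplify_instruction(instruction: str, handedness: str) -> str:
--     """
--     Simplify the instruction string by replacing
--     - forehand front with '1',
--     - forehand back with '2',
--     - backhand back with '3',
--     - backhand front with '4'
--     """
--     forehand = "right" if handedness == "R" else "left"
--     backhand = "left" if handedness == "R" else "right"
--
--     mapping = {
--         f"{forehand} front": "1",
--         f"{forehand} back": "2",
--         f"{backhand} back": "3",
--         f"{backhand} front": "4"
--     }
--
--     for key, value in mapping.items():
--         instruction = instruction.replace(key, value)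
--
--     return instruction
-- ===== SOURCE B (Python) =====
-- def simplify_instruction(instruction: str, handedness: str) -> str:
--     """Single left-to-right scan: at each position replace the first matching
--     handedness phrase with its digit, instead of four full replace passes."""
--     if handedness == "R":
--         forehand, backhand = "right", "left"
--     else:
--         forehand, backhand = "left", "right"
--     items = [
--         (forehand + " front", "1"),
--         (forehand + " back", "2"),
--         (backhand + " back", "3"),
--         (backhand + " front", "4"),
--     ]
--     out = []
--     i = 0
--     n = len(instruction)
--     while i < n:
--         for k, v in items:
--             if instruction.startswith(k, i):
--                 out.append(v)
--                 i += len(k)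
--                 break
--         else:
--             out.append(instruction[i])
--             i += 1
--     return "".join(out)
-- ===== Notes on version B (the rewrite author's own statement) =====
-- stated objective: alternative
-- what changed: B replaces A's four sequential full-string .replace passes by a single left-to-right scan over the instruction that substitutes the first matching handedness phrase with its digit at each position.
import Mathlib
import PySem

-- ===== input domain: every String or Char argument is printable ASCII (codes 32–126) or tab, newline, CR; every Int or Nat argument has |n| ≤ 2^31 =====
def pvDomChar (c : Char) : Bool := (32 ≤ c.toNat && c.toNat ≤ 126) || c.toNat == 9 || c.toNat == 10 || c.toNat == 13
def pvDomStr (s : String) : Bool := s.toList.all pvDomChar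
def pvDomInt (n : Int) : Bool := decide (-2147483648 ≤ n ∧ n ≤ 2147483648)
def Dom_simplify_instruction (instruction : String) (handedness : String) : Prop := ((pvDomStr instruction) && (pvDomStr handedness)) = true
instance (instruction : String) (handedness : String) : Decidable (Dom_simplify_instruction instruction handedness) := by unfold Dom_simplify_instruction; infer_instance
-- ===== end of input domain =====

-- B's change: one left-to-right scan substituting the first matching handedness
-- phrase with its digit, instead of A's four sequential .replace passes (alternative decomposition).

-- ===== PORT A =====
def simplify_instruction (instruction : String) (handedness : String) : String :=
  let forehand : String := if handedness == "R" then "right" else "left"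
  let backhand : String := if handedness == "R" then "left" else "right"
  let mapping : PySem.Dict String String :=
    ((((PySem.Dict.empty).insert (forehand ++ " front") "1").insert
        (forehand ++ " back") "2").insert
        (backhand ++ " back") "3").insert
        (backhand ++ " front") "4"
  mapping.items.foldl (fun ins kv => PySem.Str.replace ins kv.1 kv.2) instruction

-- ===== PORT B =====
-- B's while loop over index i; fuel = remaining length makes the recursion total
-- (each step of Source B consumes at least one character since every key is nonempty).
def pvScan : Nat → List (List Char × List Char) → List Char → List Char
  | 0, _, _ => []
  | _ + 1, _, [] => []
  | fuel + 1, m, c :: cs =>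
    match m.find? (fun kv => kv.1.isPrefixOf (c :: cs)) with
    | some kv => kv.2 ++ pvScan fuel m ((c :: cs).drop kv.1.length)
    | none => c :: pvScan fuel m cs

def simplify_instruction_alt (instruction : String) (handedness : String) : String :=
  let forehand : String := if handedness == "R" then "right" else "left"
  let backhand : String := if handedness == "R" then "left" else "right"
  let items : List (List Char × List Char) :=
    [((forehand ++ " front").toList, ['1']),
     ((forehand ++ " back").toList, ['2']),
     ((backhand ++ " back").toList, ['3']),
     ((backhand ++ " front").toList, ['4'])]
  String.ofList (pvScan instruction.toList.length items instruction.toList)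

-- ===== PRECONDITION & SPEC =====
def Spec_simplify_instruction (instruction : String) (handedness : String) (out : String) : Prop := out = simplify_instruction_alt instruction handedness
instance (instruction : String) (handedness : String) (out : String) : Decidable (Spec_simplify_instruction instruction handedness out) := by unfold Spec_simplify_instruction; infer_instance

-- ===== CLAIM (what is proved, stated in full; the proofs are below) =====
def Claim_equal_simplify_instruction : Prop := ∀ (instruction : String) (handedness : String), Dom_simplify_instruction instruction handedness → Spec_simplify_instruction instruction handedness (simplify_instruction instruction handedness)

-- ===== LEMMAS AND PROOFS =====

-- A clean fuel-based rendering of PySem.Chars.replace.go without the accumulator.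
def pvRep (old new : List Char) : Nat → List Char → List Char
  | 0, l => l
  | _ + 1, [] => []
  | fuel + 1, c :: cs =>
    if old.isPrefixOf (c :: cs) then new ++ pvRep old new fuel ((c :: cs).drop old.length)
    else c :: pvRep old new fuel cs

theorem pvGo_eq_pvRep (old new : List Char) :
    ∀ (fuel : Nat) (l acc : List Char),
      PySem.Chars.replace.go old new fuel l acc = acc.reverse ++ pvRep old new fuel l := by
  intro fuel
  induction fuel with
  | zero => intro l acc; simp [PySem.Chars.replace.go, pvRep]
  | succ f ih =>
    intro l acc
    cases l with
    | nil => simp [PySem.Chars.replace.go, pvRep]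
    | cons c t =>
      rw [PySem.Chars.replace.go]
      by_cases h : old.isPrefixOf (c :: t)
      · simp only [h, if_true, ih, pvRep]
        simp
      · simp only [h, ih, pvRep]
        simp

theorem pvReplace_eq_pvRep (s old new : List Char) (h : old ≠ []) :
    PySem.Chars.replace s old new = pvRep old new s.length s := by
  rw [PySem.Chars.replace]
  simp [List.isEmpty_iff, h, pvGo_eq_pvRep]

theorem pvRep_mono (old new : List Char) (h : old ≠ []) :
    ∀ (f₁ : Nat) (f₂ : Nat) (l : List Char), l.length ≤ f₁ → l.length ≤ f₂ →
      pvRep old new f₁ l = pvRep old new f₂ l := by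
  intro f₁
  induction f₁ with
  | zero =>
    intro f₂ l h1 _
    have : l = [] := List.length_eq_zero_iff.mp (Nat.le_zero.mp h1)
    subst this
    cases f₂ <;> rfl
  | succ f ih =>
    intro f₂ l h1 h2
    cases l with
    | nil => cases f₂ <;> rfl
    | cons c t =>
      cases f₂ with
      | zero => simp at h2
      | succ g =>
        simp only [pvRep]
        by_cases hp : old.isPrefixOf (c :: t)
        · simp only [hp, if_true]
          have hlen : ((c :: t).drop old.length).length ≤ f := by
            simp only [List.length_drop, List.length_cons]
            have : 1 ≤ old.length := List.length_pos_iff.mpr h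
            simp at h1; omega
          have hlen2 : ((c :: t).drop old.length).length ≤ g := by
            simp only [List.length_drop, List.length_cons]
            have : 1 ≤ old.length := List.length_pos_iff.mpr h
            simp at h2; omega
          rw [ih _ _ hlen hlen2]
        · simp only [hp, Bool.false_eq_true, if_false]
          have h1' : t.length ≤ f := by simp at h1; omega
          have h2' : t.length ≤ g := by simp at h2; omega
          rw [ih _ _ h1' h2']

-- pvR / pvS: replace and scan at canonical fuel
def pvR (old new l : List Char) : List Char := pvRep old new l.length l

theorem pvR_cons_neg (old new : List Char) (c : Char) (cs : List Char)
    (h : old.isPrefixOf (c :: cs) = false) :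
    pvR old new (c :: cs) = c :: pvR old new cs := by
  simp [pvR, pvRep, h]

theorem pvR_match (old new l : List Char) (hold : old ≠ []) (h : old <+: l) :
    pvR old new l = new ++ pvR old new (l.drop old.length) := by
  cases l with
  | nil =>
    have : old = [] := List.prefix_nil.mp h
    exact absurd this hold
  | cons c t =>
    have hp : old.isPrefixOf (c :: t) = true := List.isPrefixOf_iff_prefix.mpr h
    simp only [pvR, List.length_cons, pvRep, hp, if_true]
    congr 1
    apply pvRep_mono old new hold
    · simp only [List.length_drop, List.length_cons]
      have : 1 ≤ old.length := List.length_pos_iff.mpr hold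
      omega
    · exact le_rfl

theorem pvR_skip (old new X : List Char) (hold : old ≠ []) :
    ∀ u : List Char, (∀ c ∈ u, c ∉ old) → pvR old new (u ++ X) = u ++ pvR old new X := by
  intro u
  induction u with
  | nil => intro _; rfl
  | cons c u' ih =>
    intro hu
    have hnp : old.isPrefixOf (c :: (u' ++ X)) = false := by
      cases old with
      | nil => exact absurd rfl hold
      | cons o os =>
        by_contra hcon
        simp only [Bool.not_eq_false] at hcon
        have := List.isPrefixOf_iff_prefix.mp hcon
        obtain ⟨r, hr⟩ := this
        have : o = c := by
          have := congrArg (fun l => l.head?) hr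
          simpa using this
        exact (hu c (by simp)) (this ▸ List.mem_cons_self)
    rw [List.cons_append, pvR_cons_neg old new _ _ hnp, ih (fun d hd => hu d (by simp [hd]))]
    simp

theorem pvScan_nil (f : Nat) (m : List (List Char × List Char)) : pvScan f m [] = [] := by
  cases f <;> rfl

theorem pvScan_mono (m : List (List Char × List Char)) (hne : ∀ kv ∈ m, kv.1 ≠ []) :
    ∀ (f₁ : Nat) (f₂ : Nat) (l : List Char), l.length ≤ f₁ → l.length ≤ f₂ →
      pvScan f₁ m l = pvScan f₂ m l := by
  intro f₁
  induction f₁ with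
  | zero =>
    intro f₂ l h1 _
    have : l = [] := List.length_eq_zero_iff.mp (Nat.le_zero.mp h1)
    subst this
    cases f₂ <;> rfl
  | succ f ih =>
    intro f₂ l h1 h2
    cases l with
    | nil => cases f₂ <;> rfl
    | cons c t =>
      cases f₂ with
      | zero => simp at h2
      | succ g =>
        simp only [pvScan]
        cases hf : m.find? (fun kv => kv.1.isPrefixOf (c :: t)) with
        | none =>
          have h1' : t.length ≤ f := by simp at h1; omega
          have h2' : t.length ≤ g := by simp at h2; omega
          rw [ih _ _ h1' h2']
        | some kv =>
          have hk : kv.1 ≠ [] := hne kv (List.mem_of_find?_eq_some hf)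
          have hkl : 1 ≤ kv.1.length := List.length_pos_iff.mpr hk
          have hl1 : ((c :: t).drop kv.1.length).length ≤ f := by
            simp only [List.length_drop, List.length_cons]; simp at h1; omega
          have hl2 : ((c :: t).drop kv.1.length).length ≤ g := by
            simp only [List.length_drop, List.length_cons]; simp at h2; omega
          show kv.2 ++ pvScan f m (List.drop kv.1.length (c :: t))
              = kv.2 ++ pvScan g m (List.drop kv.1.length (c :: t))
          rw [ih _ _ hl1 hl2]

def pvS (m : List (List Char × List Char)) (l : List Char) : List Char := pvScan l.length m l

theorem pvS_cons_none (m : List (List Char × List Char)) (c : Char) (cs : List Char)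
    (h : m.find? (fun kv => kv.1.isPrefixOf (c :: cs)) = none) :
    pvS m (c :: cs) = c :: pvS m cs := by
  simp only [pvS, List.length_cons, pvScan, h]

theorem pvS_cons_some (m : List (List Char × List Char)) (hne : ∀ kv ∈ m, kv.1 ≠ [])
    (c : Char) (cs : List Char) (kv : List Char × List Char)
    (h : m.find? (fun kv => kv.1.isPrefixOf (c :: cs)) = some kv) :
    pvS m (c :: cs) = kv.2 ++ pvS m ((c :: cs).drop kv.1.length) := by
  simp only [pvS, List.length_cons, pvScan, h]
  congr 1
  apply pvScan_mono m hne
  · have hk : kv.1 ≠ [] := hne kv (List.mem_of_find?_eq_some h)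
    have : 1 ≤ kv.1.length := List.length_pos_iff.mpr hk
    simp only [List.length_drop, List.length_cons]; omega
  · exact le_rfl

theorem pvS_empty (l : List Char) : pvS [] l = l := by
  induction l with
  | nil => rfl
  | cons c cs ih =>
    rw [pvS_cons_none [] c cs (by simp), ih]

-- if a prefix of the scan output avoids every value character, it is a prefix of the input
theorem pvS_prefix_pull (m : List (List Char × List Char))
    (hne : ∀ kv ∈ m, kv.1 ≠ []) (hv : ∀ kv ∈ m, kv.2 ≠ []) :
    ∀ (n : Nat) (s w : List Char), s.length ≤ n →
      (∀ c ∈ w, ∀ kv ∈ m, c ∉ kv.2) → w <+: pvS m s → w <+: s := by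
  intro n
  induction n with
  | zero =>
    intro s w h1 _ hw
    have : s = [] := List.length_eq_zero_iff.mp (Nat.le_zero.mp h1)
    subst this
    have hwn : w = [] := by simpa [pvS, pvScan_nil] using hw
    simp [hwn]
  | succ n ih =>
    intro s w h1 hchars hw
    cases s with
    | nil =>
      have hwn : w = [] := by simpa [pvS, pvScan_nil] using hw
      simp [hwn]
    | cons c cs =>
      cases w with
      | nil => exact List.nil_prefix
      | cons d w' =>
        cases hf : m.find? (fun kv => kv.1.isPrefixOf (c :: cs)) with
        | some kv =>
          exfalso
          rw [pvS_cons_some m hne c cs kv hf] at hw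
          have hmem : kv ∈ m := List.mem_of_find?_eq_some hf
          obtain ⟨e, vrest, hev⟩ := List.exists_cons_of_ne_nil (hv kv hmem)
          rw [hev, List.cons_append] at hw
          have hde : d = e := (List.cons_prefix_cons.mp hw).1
          exact hchars d (by simp) kv hmem (by rw [hev, hde]; simp)
        | none =>
          rw [pvS_cons_none m c cs hf] at hw
          have hdc : d = c := (List.cons_prefix_cons.mp hw).1
          have hw' : w' <+: pvS m cs := (List.cons_prefix_cons.mp hw).2
          have hrec := ih cs w' (by simp at h1; omega)
            (fun e he kv hkv => hchars e (by simp [he]) kv hkv) hw'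
          exact List.cons_prefix_cons.mpr ⟨hdc, hrec⟩

theorem pvS_append_nomatch (m : List (List Char × List Char)) (t : List Char) :
    ∀ u : List Char,
      (∀ q : Nat, q < u.length → m.find? (fun kv => kv.1.isPrefixOf (u.drop q ++ t)) = none) →
      pvS m (u ++ t) = u ++ pvS m t := by
  intro u
  induction u with
  | nil => intro _; rfl
  | cons c u' ih =>
    intro h
    have h0 : m.find? (fun kv => kv.1.isPrefixOf (c :: (u' ++ t))) = none := by
      have := h 0 (by simp)
      simpa using this
    rw [List.cons_append, pvS_cons_none m _ _ h0,
      ih (fun q hq => by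
        have := h (q + 1) (by simp; omega)
        simpa using this)]
    simp

-- the non-interference conditions the four phrase/digit pairs satisfy
def pvGood (full : List (List Char × List Char)) : Prop :=
  (∀ kv ∈ full, kv.1 ≠ [] ∧ kv.2 ≠ []) ∧
  (∀ kv ∈ full, ∀ kv' ∈ full, ∀ c ∈ kv.2, c ∉ kv'.1) ∧
  (∀ kv ∈ full, ∀ kv' ∈ full, ∀ q : Nat, q < kv.1.length → (0 < q ∨ kv.1 ≠ kv'.1) →
      ¬ kv'.1 <+: kv.1.drop q ∧ ¬ kv.1.drop q <+: kv'.1)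

def pvGoodB (full : List (List Char × List Char)) : Bool :=
  full.all (fun kv => !kv.1.isEmpty && !kv.2.isEmpty) &&
  full.all (fun kv => full.all (fun kv' => kv.2.all (fun c => !kv'.1.contains c))) &&
  full.all (fun kv => full.all (fun kv' =>
    (List.range kv.1.length).all (fun q =>
      ((q == 0) && (kv.1 == kv'.1)) ||
      (!(kv'.1.isPrefixOf (kv.1.drop q)) && !((kv.1.drop q).isPrefixOf kv'.1)))))

theorem pvGood_of_b (full : List (List Char × List Char)) (h : pvGoodB full = true) :
    pvGood full := by
  unfold pvGoodB at h
  simp only [Bool.and_eq_true, List.all_eq_true] at h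
  obtain ⟨⟨h1, h2⟩, h3⟩ := h
  refine ⟨?_, ?_, ?_⟩
  · intro kv hkv
    have := h1 kv hkv
    simp only [Bool.not_eq_true', List.isEmpty_eq_false_iff] at this
    exact this
  · intro kv hkv kv' hkv' c hc
    have := h2 kv hkv kv' hkv' c hc
    simpa using this
  · intro kv hkv kv' hkv' q hq hcond
    have := h3 kv hkv kv' hkv' q (List.mem_range.mpr hq)
    simp only [Bool.or_eq_true, Bool.and_eq_true, beq_iff_eq, Bool.not_eq_true'] at this
    rcases this with ⟨hq0, hkk⟩ | ⟨ha, hb⟩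
    · rcases hcond with hpos | hne
      · omega
      · exact absurd hkk hne
    · constructor
      · intro hp
        rw [List.isPrefixOf_iff_prefix.mpr hp] at ha
        simp at ha
      · intro hp
        rw [List.isPrefixOf_iff_prefix.mpr hp] at hb
        simp at hb

theorem pvNotPrefix_append (k u t : List Char) (h1 : ¬ k <+: u) (h2 : ¬ u <+: k) :
    ¬ k <+: (u ++ t) := by
  intro h
  rcases List.prefix_or_prefix_of_prefix h (List.prefix_append u t) with h' | h'
  · exact h1 h'
  · exact h2 h'

theorem pvStep (full m : List (List Char × List Char)) (k₀ v₀ : List Char)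
    (G : pvGood full) (hsub : ∀ kv ∈ m ++ [(k₀, v₀)], kv ∈ full) :
    ∀ (n : Nat) (s : List Char), s.length ≤ n →
      pvR k₀ v₀ (pvS m s) = pvS (m ++ [(k₀, v₀)]) s := by
  have hk₀mem : ((k₀, v₀) : List Char × List Char) ∈ full := hsub _ (by simp)
  have hmsub : ∀ kv ∈ m, kv ∈ full := fun kv h => hsub kv (by simp [h])
  have hne_m : ∀ kv ∈ m, kv.1 ≠ [] := fun kv h => (G.1 kv (hmsub kv h)).1
  have hv_m : ∀ kv ∈ m, kv.2 ≠ [] := fun kv h => (G.1 kv (hmsub kv h)).2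
  have hk₀ : k₀ ≠ [] := (G.1 _ hk₀mem).1
  have hne_all : ∀ kv ∈ m ++ [(k₀, v₀)], kv.1 ≠ [] := fun kv h => (G.1 kv (hsub kv h)).1
  intro n
  induction n with
  | zero =>
    intro s h1
    have : s = [] := List.length_eq_zero_iff.mp (Nat.le_zero.mp h1)
    subst this
    simp [pvS, pvScan_nil, pvR, pvRep]
  | succ n ih =>
    intro s h1
    cases s with
    | nil => simp [pvS, pvScan_nil, pvR, pvRep]
    | cons c cs =>
      cases hf : m.find? (fun kv => kv.1.isPrefixOf (c :: cs)) with
      | some kv =>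
        have hmem : kv ∈ m := List.mem_of_find?_eq_some hf
        have hkl : 1 ≤ kv.1.length := List.length_pos_iff.mpr (hne_m kv hmem)
        rw [pvS_cons_some m hne_m c cs kv hf]
        rw [pvR_skip k₀ v₀ _ hk₀ kv.2
          (fun ch hch => G.2.1 kv (hmsub _ hmem) (k₀, v₀) hk₀mem ch hch)]
        have hdrop : ((c :: cs).drop kv.1.length).length ≤ n := by
          simp only [List.length_drop, List.length_cons]
          simp at h1; omega
        rw [ih _ hdrop]
        have hf' : (m ++ [(k₀, v₀)]).find? (fun kv => kv.1.isPrefixOf (c :: cs)) = some kv := by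
          rw [List.find?_append, hf]; rfl
        rw [pvS_cons_some _ hne_all c cs kv hf']
      | none =>
        have hnone : ∀ kv ∈ m, ¬ kv.1 <+: (c :: cs) := by
          intro kv hkv hp
          have := List.find?_eq_none.mp hf kv hkv
          simp [List.isPrefixOf_iff_prefix.mpr hp] at this
        by_cases hk : k₀ <+: (c :: cs)
        · obtain ⟨t, ht⟩ := hk
          have htlen : t.length ≤ n := by
            have := congrArg List.length ht
            simp at this
            have hkl : 1 ≤ k₀.length := List.length_pos_iff.mpr hk₀
            simp at h1; omega
          have hscan : pvS m (c :: cs) = k₀ ++ pvS m t := by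
            rw [← ht]
            apply pvS_append_nomatch
            intro q hq
            rw [List.find?_eq_none]
            intro kv hkv
            simp only [Bool.not_eq_true]
            rw [← Bool.not_eq_true]
            intro hcon
            have hpre := List.isPrefixOf_iff_prefix.mp hcon
            rcases Nat.eq_zero_or_pos q with hq0 | hq0
            · subst hq0
              simp only [List.drop_zero] at hpre
              rw [ht] at hpre
              exact hnone kv hkv hpre
            · have hsep := G.2.2 (k₀, v₀) hk₀mem kv (hmsub kv hkv) q hq (Or.inl hq0)
              exact pvNotPrefix_append kv.1 (k₀.drop q) t hsep.1 hsep.2 hpre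
          rw [hscan]
          rw [pvR_match k₀ v₀ _ hk₀ (List.prefix_append _ _)]
          rw [List.drop_left]
          rw [ih t htlen]
          have hdt : (c :: cs).drop k₀.length = t := by
            rw [← ht, List.drop_left]
          have hf' : (m ++ [(k₀, v₀)]).find? (fun kv => kv.1.isPrefixOf (c :: cs)) = some (k₀, v₀) := by
            rw [List.find?_append, hf, Option.none_or]
            simp [List.isPrefixOf_iff_prefix.mpr ⟨t, ht⟩]
          rw [pvS_cons_some _ hne_all c cs (k₀, v₀) hf', hdt]
        · rw [pvS_cons_none m c cs hf]
          have hnp : k₀.isPrefixOf (c :: pvS m cs) = false := by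
            rw [← Bool.not_eq_true]
            intro hcon
            have hpre := List.isPrefixOf_iff_prefix.mp hcon
            obtain ⟨o, os, ho⟩ := List.exists_cons_of_ne_nil hk₀
            rw [ho] at hpre
            have hoc : o = c := (List.cons_prefix_cons.mp hpre).1
            have hos : os <+: pvS m cs := (List.cons_prefix_cons.mp hpre).2
            have hchars : ∀ ch ∈ os, ∀ kv ∈ m, ch ∉ kv.2 := by
              intro ch hch kv hkv hin
              have := G.2.1 kv (hmsub kv hkv) (k₀, v₀) hk₀mem ch hin
              exact this (by rw [ho]; simp [hch])
            have := pvS_prefix_pull m hne_m hv_m cs.length cs os le_rfl hchars hos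
            exact hk (by rw [ho, hoc]; exact List.cons_prefix_cons.mpr ⟨rfl, this⟩)
          rw [pvR_cons_neg _ _ _ _ hnp]
          rw [ih cs (by simp at h1; omega)]
          have hf' : (m ++ [(k₀, v₀)]).find? (fun kv => kv.1.isPrefixOf (c :: cs)) = none := by
            rw [List.find?_append, hf, Option.none_or]
            simp only [List.find?_cons, List.find?_nil]
            have : k₀.isPrefixOf (c :: cs) = false := by
              rw [← Bool.not_eq_true]
              intro hcon
              exact hk (List.isPrefixOf_iff_prefix.mp hcon)
            simp [this]
          rw [pvS_cons_none _ c cs hf']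

theorem pvChain (full : List (List Char × List Char)) (G : pvGood full) :
    ∀ m : List (List Char × List Char), (∀ kv ∈ m, kv ∈ full) →
      ∀ s : List Char, m.foldl (fun acc kv => pvR kv.1 kv.2 acc) s = pvS m s := by
  intro m
  induction m using List.reverseRecOn with
  | nil => intro _ s; simp [pvS_empty]
  | append_singleton m p ihm =>
    intro hsub s
    rw [List.foldl_append]
    simp only [List.foldl_cons, List.foldl_nil]
    rw [ihm (fun kv h => hsub kv (by simp [h])) s]
    obtain ⟨k₀, v₀⟩ := p
    exact pvStep full m k₀ v₀ G hsub s.length s le_rfl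

theorem pvReplace_eq_pvR (s old new : List Char) (h : old ≠ []) :
    PySem.Chars.replace s old new = pvR old new s := pvReplace_eq_pvRep s old new h

-- string-level workhorse: one branch of both ports
theorem pvBranch (s k1 k2 k3 k4 : String)
    (G : pvGood [(k1.toList, ['1']), (k2.toList, ['2']), (k3.toList, ['3']), (k4.toList, ['4'])]) :
    PySem.Str.replace (PySem.Str.replace (PySem.Str.replace (PySem.Str.replace s k1 "1") k2 "2") k3 "3") k4 "4"
      = String.ofList (pvScan s.toList.length
          [(k1.toList, ['1']), (k2.toList, ['2']), (k3.toList, ['3']), (k4.toList, ['4'])] s.toList) := by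
  have h1 : k1.toList ≠ [] := (G.1 (k1.toList, ['1']) (by simp)).1
  have h2 : k2.toList ≠ [] := (G.1 (k2.toList, ['2']) (by simp)).1
  have h3 : k3.toList ≠ [] := (G.1 (k3.toList, ['3']) (by simp)).1
  have h4 : k4.toList ≠ [] := (G.1 (k4.toList, ['4']) (by simp)).1
  apply String.toList_inj.mp
  have hchain := pvChain _ G _ (fun kv h => h) s.toList
  simp only [List.foldl_cons, List.foldl_nil] at hchain
  simp only [PySem.Str.toList_replace]
  have e1 : ("1" : String).toList = ['1'] := by decide
  have e2 : ("2" : String).toList = ['2'] := by decide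
  have e3 : ("3" : String).toList = ['3'] := by decide
  have e4 : ("4" : String).toList = ['4'] := by decide
  rw [e1, e2, e3, e4]
  rw [pvReplace_eq_pvR _ _ _ h1, pvReplace_eq_pvR _ _ _ h2,
    pvReplace_eq_pvR _ _ _ h3, pvReplace_eq_pvR _ _ _ h4]
  rw [hchain]
  simp [pvS]

-- ===== VERDICT (by name: the statement is the Claim_ definition above) =====
theorem simplify_instruction_spec : Claim_equal_simplify_instruction := by
  unfold Claim_equal_simplify_instruction
  intro instruction handedness _
  simp only [Spec_simplify_instruction, simplify_instruction, simplify_instruction_alt]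
  cases hR : handedness == "R"
  · simp only [Bool.false_eq_true, if_false]
    have hitems : (((((PySem.Dict.empty (κ := String) (ν := String)).insert
          "left front" "1").insert "left back" "2").insert
          "right back" "3").insert "right front" "4").items
        = [("left front", "1"), ("left back", "2"), ("right back", "3"), ("right front", "4")] := by
      decide
    have ha : ("left" : String) ++ " front" = "left front" := rfl
    have hb : ("left" : String) ++ " back" = "left back" := rfl
    have hc : ("right" : String) ++ " back" = "right back" := rfl
    have hd : ("right" : String) ++ " front" = "right front" := rfl
    rw [ha, hb, hc, hd, hitems]
    simp only [List.foldl_cons, List.foldl_nil]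
    exact pvBranch instruction "left front" "left back" "right back" "right front" (pvGood_of_b _ (by decide))
  · simp only [if_true]
    have hitems : (((((PySem.Dict.empty (κ := String) (ν := String)).insert
          "right front" "1").insert "right back" "2").insert
          "left back" "3").insert "left front" "4").items
        = [("right front", "1"), ("right back", "2"), ("left back", "3"), ("left front", "4")] := by
      decide
    have ha : ("right" : String) ++ " front" = "right front" := rfl
    have hb : ("right" : String) ++ " back" = "right back" := rfl
    have hc : ("left" : String) ++ " back" = "left back" := rfl
    have hd : ("left" : String) ++ " front" = "left front" := rfl
    rw [ha, hb, hc, hd, hitems]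
    simp only [List.foldl_cons, List.foldl_nil]
    exact pvBranch instruction "right front" "right back" "left back" "left front" (pvGood_of_b _ (by decide))
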